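-- pv_equiv track=rewrite | github.com/DaiChi904/Atcoder | AtCoderBeginnerContest/Contest414/C.py | calcNArySystemValue
-- ===== SOURCE A (Python) =====
-- def calcNArySystemValue(number: int, A: int):
--     temp = number
--     res = ""
--     while (True):
--         rem = temp % A
--         temp = temp // A
--         res += str(rem)
--
--         if (temp == 0):
--             break
--
--     return int(res)
-- ===== SOURCE B (Python) =====
-- def _rems(t, A):
--     q, r = divmod(t, A)
--     if q == 0:
--         return [r]
--     return [r] + _rems(q, A)
--
--
-- def calcNArySystemValue(number: int, A: int):
--     return int("".join(map(str, _rems(number, A))))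
-- ===== Notes on version B (the rewrite author's own statement) =====
-- stated objective: alternative
-- what changed: A's do-while loop mutating a string accumulator is replaced by two stages: a recursion over divmod collecting the base-A remainders into a list, then a single join of their decimal strings; the string is never built incrementally inside the division recurrence.
import Mathlib
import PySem

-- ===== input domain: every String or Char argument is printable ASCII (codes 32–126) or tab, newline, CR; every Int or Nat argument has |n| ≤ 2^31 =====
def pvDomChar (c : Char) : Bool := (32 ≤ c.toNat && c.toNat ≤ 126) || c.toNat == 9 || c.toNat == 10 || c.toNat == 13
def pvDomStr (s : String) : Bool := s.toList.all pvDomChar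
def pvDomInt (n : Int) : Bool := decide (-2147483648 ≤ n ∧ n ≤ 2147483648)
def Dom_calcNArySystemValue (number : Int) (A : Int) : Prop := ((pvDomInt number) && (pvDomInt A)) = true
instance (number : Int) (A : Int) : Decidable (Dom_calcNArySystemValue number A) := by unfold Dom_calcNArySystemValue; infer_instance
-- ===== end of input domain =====

-- B replaces A's do-while loop that mutates a string accumulator by two stages: a recursion
-- over divmod collecting the base-A remainders into a list, then one join of their decimal
-- strings (alternative decomposition; same cost). Equivalence is proved where Python A returns.

-- ===== PORT A =====
-- A's `while True` loop; fuel makes the recursion total in Lean (fuel 0 is never reached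
-- inside Pre_: the loop runs at most number.natAbs + 1 iterations there).
def pvLoopA (A : Int) : Nat → Int → String → String
  | 0, _, res => res
  | fuel + 1, temp, res =>
    let rem := PySem.Int.mod temp A
    let temp2 := PySem.Int.floordiv temp A
    let res2 := res ++ PySem.Int.toStr rem
    if temp2 = 0 then res2 else pvLoopA A fuel temp2 res2

def calcNArySystemValue (number : Int) (A : Int) : Int :=
  (PySem.Int.ofStr? (pvLoopA A (number.natAbs + 2) number "")).getD 0

-- ===== PORT B =====
-- Source B's _rems recursion (divmod into a list), with the same fuel discipline.
def pvRemsB (A : Int) : Nat → Int → List Int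
  | 0, _ => []
  | fuel + 1, t =>
    let qr := (PySem.Int.divmod? t A).getD (0, 0)
    if qr.1 = 0 then [qr.2] else qr.2 :: pvRemsB A fuel qr.1

def calcNArySystemValue_alt (number : Int) (A : Int) : Int :=
  (PySem.Int.ofStr? (PySem.Str.join "" ((pvRemsB A (number.natAbs + 2) number).map PySem.Int.toStr))).getD 0

-- ===== PRECONDITION & SPEC =====
-- Exactly where Python A returns: for A = 0 it raises ZeroDivisionError; for negative
-- number with A ≥ 2, or A = 1 with number ≠ 0, or A ≤ number < 0, the loop never terminates;
-- otherwise for A < 0 the digit string contains an interior '-' and int(res) raises ValueError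
-- (the case A < number < 0 stops after one iteration with res = str(number) and is kept).
def Pre_calcNArySystemValue (number : Int) (A : Int) : Prop :=
  (0 ≤ number ∧ 2 ≤ A) ∨ (number = 0 ∧ A ≠ 0) ∨ (A < number ∧ number < 0)
instance (number : Int) (A : Int) : Decidable (Pre_calcNArySystemValue number A) := by
  unfold Pre_calcNArySystemValue; infer_instance

def pvWitness_calcNArySystemValue : Int × Int := (25, 2)

def Spec_calcNArySystemValue (number : Int) (A : Int) (out : Int) : Prop := out = calcNArySystemValue_alt number A
instance (number : Int) (A : Int) (out : Int) : Decidable (Spec_calcNArySystemValue number A out) := by unfold Spec_calcNArySystemValue; infer_instance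

-- ===== CLAIM (what is proved, stated in full; the proofs are below) =====
def Claim_equal_calcNArySystemValue : Prop := ∀ (number : Int) (A : Int), Dom_calcNArySystemValue number A → Pre_calcNArySystemValue number A → Spec_calcNArySystemValue number A (calcNArySystemValue number A)

-- ===== LEMMAS AND PROOFS =====
-- "".join with empty separator, structurally.
theorem pv_join_empty_nil : PySem.Str.join "" ([] : List String) = "" := by decide

theorem pv_intercalate_nil (l : List (List Char)) :
    ([] : List Char).intercalate l = l.flatten := by
  induction l with
  | nil => simp [List.intercalate]
  | cons x t ih => cases t <;> simp_all [List.intercalate, List.intersperse]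

theorem pv_join_empty_cons (x : String) (l : List String) :
    PySem.Str.join "" (x :: l) = x ++ PySem.Str.join "" l := by
  simp [PySem.Str.join, PySem.Chars.join, pv_intercalate_nil]

-- A's loop is the join of the decimal strings of B's remainder list, behind the accumulator.
theorem pvLoopA_eq_join (A : Int) (hA : A ≠ 0) (fuel : Nat) :
    ∀ (temp : Int) (res : String),
      pvLoopA A fuel temp res = res ++ PySem.Str.join "" ((pvRemsB A fuel temp).map PySem.Int.toStr) := by
  induction fuel with
  | zero => intro temp res; simp [pvLoopA, pvRemsB, pv_join_empty_nil]
  | succ fuel ih =>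
    intro temp res
    simp only [pvLoopA, pvRemsB, PySem.Int.divmod?, PySem.Int.floordiv, PySem.Int.mod, hA,
      if_false, Option.getD_some]
    by_cases h : temp.fdiv A = 0
    · simp [h, pv_join_empty_cons, pv_join_empty_nil]
    · simp [h, ih, pv_join_empty_cons, String.append_assoc]

-- ===== VERDICT (by name: the statement is the Claim_ definition above) =====
theorem calcNArySystemValue_spec : Claim_equal_calcNArySystemValue := by
  intro number A _ hpre
  have hA : A ≠ 0 := by
    rcases hpre with ⟨_, h2⟩ | ⟨_, h2⟩ | ⟨h1, h2⟩ <;> omega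
  unfold Spec_calcNArySystemValue calcNArySystemValue calcNArySystemValue_alt
  rw [pvLoopA_eq_join A hA]
  simp
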